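-- pv_equiv track=rewrite | github.com/AleWWH1104/Proyecto1-DLP | src/parser_yalex.py | _find_action_brace
-- ===== SOURCE A (Python) =====
-- def _find_action_brace(text: str) -> int:
--     in_squote = False
--     in_dquote = False
--     for i, c in enumerate(text):
--         if in_squote:
--             if c == "'":
--                 in_squote = False
--         elif in_dquote:
--             if c == '"':
--                 in_dquote = False
--         elif c == "'":
--             in_squote = True
--         elif c == '"':
--             in_dquote = True
--         elif c == "{":
--             return i
--     return -1
-- ===== SOURCE B (Python) =====
-- def _find_action_brace(text: str) -> int:
--     i, n = 0, len(text)
--     while i < n: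
--         c = text[i]
--         if c == "'" or c == '"':
--             j = text.find(c, i + 1)
--             i = n if j == -1 else j + 1
--         elif c == "{":
--             return i
--         else:
--             i += 1
--     return -1
-- ===== Notes on version B (the rewrite author's own statement) =====
-- stated objective: alternative
-- what changed: Replaces the per-character two-flag quote state machine with an index loop that, on a quote character, jumps past the whole quoted span in one str.find call (or to end of string if unterminated).
import Mathlib
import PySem

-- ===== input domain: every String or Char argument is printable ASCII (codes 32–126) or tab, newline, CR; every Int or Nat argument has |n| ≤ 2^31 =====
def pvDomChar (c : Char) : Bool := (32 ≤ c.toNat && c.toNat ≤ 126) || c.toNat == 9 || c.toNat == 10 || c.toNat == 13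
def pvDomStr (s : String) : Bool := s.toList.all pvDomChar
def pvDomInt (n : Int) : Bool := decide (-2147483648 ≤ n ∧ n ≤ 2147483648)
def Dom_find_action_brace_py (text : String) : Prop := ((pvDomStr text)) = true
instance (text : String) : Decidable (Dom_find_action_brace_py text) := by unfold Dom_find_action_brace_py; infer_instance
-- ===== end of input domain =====

-- B replaces A's per-character two-flag quote state machine by an index loop that jumps
-- over each whole quoted span with one find-from-position search (objective: alternative).

-- ===== PORT A =====
-- A: scan characters with index i and two flags in_squote / in_dquote
def aGo : List Char → Int → Bool → Bool → Int
  | [], _, _, _ => -1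
  | c :: t, i, sq, dq =>
    if sq then
      if c = '\'' then aGo t (i+1) false dq else aGo t (i+1) sq dq
    else if dq then
      if c = '"' then aGo t (i+1) sq false else aGo t (i+1) sq dq
    else if c = '\'' then aGo t (i+1) true dq
    else if c = '"' then aGo t (i+1) sq true
    else if c = '{' then i
    else aGo t (i+1) sq dq

def find_action_brace_py (text : String) : Int := aGo text.toList 0 false false

-- ===== PORT B =====
-- text.find(q, i+1) ported relative to the suffix after position i: index of first q in t
def findQ (q : Char) : List Char → Option Nat
  | [] => none
  | c :: t => if c = q then some 0 else (findQ q t).map (· + 1)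

-- B: while i < n; on a quote jump past the matching quote (or to the end), on '{' return i
def altGo : Int → List Char → Int
  | _, [] => -1
  | i, c :: t =>
    if c = '\'' ∨ c = '"' then
      match findQ c t with
      | none => -1                                  -- j == -1: i = n, loop ends
      | some j => altGo (i + (j : Int) + 2) (t.drop (j+1))
    else if c = '{' then i
    else altGo (i+1) t
termination_by _ l => l.length
decreasing_by all_goals simp [List.length_drop]

def find_action_brace_py_alt (text : String) : Int := altGo 0 text.toList

-- ===== PRECONDITION & SPEC =====
def Spec_find_action_brace_py (text : String) (out : Int) : Prop := out = find_action_brace_py_alt text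
instance (text : String) (out : Int) : Decidable (Spec_find_action_brace_py text out) := by unfold Spec_find_action_brace_py; infer_instance

-- ===== CLAIM (what is proved, stated in full; the proofs are below) =====
def Claim_equal_find_action_brace_py : Prop := ∀ (text : String), Dom_find_action_brace_py text → Spec_find_action_brace_py text (find_action_brace_py text)

-- ===== LEMMAS AND PROOFS =====

-- Inside a single-quoted region A skips to the first '\'' (or returns -1 if none)
theorem aGo_squote (t : List Char) (i : Int) :
    aGo t i true false =
      (match findQ '\'' t with
       | none => -1
       | some j => aGo (t.drop (j+1)) (i + (j : Int) + 1) false false) := by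
  induction t generalizing i with
  | nil => simp [aGo, findQ]
  | cons c t ih =>
    by_cases hc : c = '\''
    · subst hc; simp [aGo, findQ]
    · simp only [aGo, findQ, if_neg hc, if_pos rfl, ih (i+1)]
      cases h : findQ '\'' t with
      | none => simp
      | some j =>
        simp only [Option.map_some]
        have : i + 1 + (j : Int) + 1 = i + ((j + 1 : Nat) : Int) + 1 := by push_cast; ring
        simp [this]

-- Inside a double-quoted region A skips to the first '"' (or returns -1 if none)
theorem aGo_dquote (t : List Char) (i : Int) :
    aGo t i false true =
      (match findQ '"' t with
       | none => -1
       | some j => aGo (t.drop (j+1)) (i + (j : Int) + 1) false false) := by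
  induction t generalizing i with
  | nil => simp [aGo, findQ]
  | cons c t ih =>
    by_cases hc : c = '"'
    · subst hc; simp [aGo, findQ]
    · simp only [aGo, findQ, if_neg hc, if_pos rfl, ih (i+1)]
      cases h : findQ '"' t with
      | none => simp
      | some j =>
        simp only [Option.map_some]
        have : i + 1 + (j : Int) + 1 = i + ((j + 1 : Nat) : Int) + 1 := by push_cast; ring
        simp [this]

theorem aGo_eq_altGo : ∀ (n : Nat) (t : List Char), t.length ≤ n → ∀ (i : Int),
    aGo t i false false = altGo i t := by
  intro n
  induction n with
  | zero =>
    intro t ht i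
    have : t = [] := List.length_eq_zero_iff.mp (Nat.le_zero.mp ht)
    subst this; simp [aGo, altGo]
  | succ n ih =>
    intro t ht i
    cases t with
    | nil => simp [aGo, altGo]
    | cons c t =>
      have htl : t.length ≤ n := by simpa using ht
      by_cases hs : c = '\''
      · subst hs
        rw [show aGo ('\'' :: t) i false false = aGo t (i+1) true false by simp [aGo],
            aGo_squote]
        simp only [altGo, if_pos (Or.inl rfl)]
        cases h : findQ '\'' t with
        | none => simp
        | some j =>
          have hd : (t.drop (j+1)).length ≤ n := le_trans (by simp) htl
          simp only [h]
          rw [ih _ hd]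
          have : i + 1 + (j : Int) + 1 = i + (j : Int) + 2 := by ring
          simp [this]
      · by_cases hd : c = '"'
        · subst hd
          rw [show aGo ('"' :: t) i false false = aGo t (i+1) false true by simp [aGo],
              aGo_dquote]
          simp only [altGo, if_pos (Or.inr rfl)]
          cases h : findQ '"' t with
          | none => simp
          | some j =>
            have hdl : (t.drop (j+1)).length ≤ n := le_trans (by simp) htl
            simp only [h]
            rw [ih _ hdl]
            have : i + 1 + (j : Int) + 1 = i + (j : Int) + 2 := by ring
            simp [this]
        · by_cases hb : c = '{'
          · subst hb; simp [aGo, altGo]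
          · have hq : ¬ (c = '\'' ∨ c = '"') := by tauto
            simp only [aGo, if_neg hs, if_neg hd, if_neg hb, if_neg, altGo, if_neg hq,
              Bool.false_eq_true, ite_false]
            exact ih t htl (i+1)

-- ===== VERDICT (by name: the statement is the Claim_ definition above) =====
theorem find_action_brace_py_spec : Claim_equal_find_action_brace_py := by
  intro text _
  unfold Spec_find_action_brace_py find_action_brace_py find_action_brace_py_alt
  exact aGo_eq_altGo text.toList.length text.toList le_rfl 0
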